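-- pv_equiv track=rewrite | github.com/jamiejamiebobamie/spd24_techInterviewQuestions | flip_game.py | return_first_move_flip_game
-- ===== SOURCE A (Python) =====
-- def return_first_move_flip_game(s):
--     string_array = list(s)
--     result = []
--     for i, char in enumerate(s):
--         if i != len(s) - 1:
--             if char == "+" and s[i+1] == "+":
--                 string_array[i],string_array[i+1] = "-", "-"
--                 result.append("".join(string_array))
--                 string_array[i],string_array[i+1] = "+", "+"
--     return result
-- ===== SOURCE B (Python) =====
-- def return_first_move_flip_game(s):
--     # Run-length encode s into maximal runs, then emit k-1 flips per '+'-run.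
--     runs = []
--     for ch in s:
--         if runs and runs[-1][0] == ch:
--             runs[-1][1] += 1
--         else:
--             runs.append([ch, 1])
--     result = []
--     pos = 0
--     for ch, k in runs:
--         if ch == '+':
--             for j in range(k - 1):
--                 i = pos + j
--                 result.append(s[:i] + '--' + s[i+2:])
--         pos += k
--     return result
-- ===== Notes on version B (the rewrite author's own statement) =====
-- stated objective: alternative
-- what changed: B is a two-stage algorithm: it first run-length encodes the string into maximal runs, then for each plus-run of length k emits its k-1 flips in closed form from the run offsets, instead of A's single per-index scan that mutates, joins and restores a char list at every flippable pair.
import Mathlib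
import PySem

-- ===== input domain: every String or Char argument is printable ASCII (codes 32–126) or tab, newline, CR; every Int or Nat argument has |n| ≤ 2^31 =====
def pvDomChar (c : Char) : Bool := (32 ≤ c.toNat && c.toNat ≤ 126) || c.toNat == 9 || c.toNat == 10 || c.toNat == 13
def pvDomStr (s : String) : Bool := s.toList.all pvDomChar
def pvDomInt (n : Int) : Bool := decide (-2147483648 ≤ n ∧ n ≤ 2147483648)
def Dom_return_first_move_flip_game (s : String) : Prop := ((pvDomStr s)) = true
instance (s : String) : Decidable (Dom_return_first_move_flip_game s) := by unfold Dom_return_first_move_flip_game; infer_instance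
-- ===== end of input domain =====

-- B replaces A's per-index scan with mutate/join/restore by a two-stage algorithm:
-- run-length encode the string, then emit the k-1 flips of each '+'-run in closed form (alternative).

-- ===== PORT A =====
-- loop body of A: state is (string_array, result); a match sets cells i, i+1 to '-',
-- joins the array into the result, then restores the two cells to '+'
def aStep (s : String) (st : List Char × List String) (ic : Int × Char) : List Char × List String :=
  if ic.1 ≠ PySem.Str.len s - 1 then
    if ic.2 = '+' ∧ PySem.Str.pyGet? s (ic.1 + 1) = some '+' then
      let arr := (st.1.set ic.1.toNat '-').set (ic.1.toNat + 1) '-'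
      ((arr.set ic.1.toNat '+').set (ic.1.toNat + 1) '+', st.2 ++ [String.ofList arr])
    else st
  else st

def return_first_move_flip_game (s : String) : List String :=
  ((PySem.List.enumerate s.toList).foldl (aStep s) (s.toList, [])).2

-- ===== PORT B =====
-- Source B stage 1 loop body: extend the last run if its char matches, else append a new run [ch, 1]
def rleStep (runs : List (Char × Int)) (ch : Char) : List (Char × Int) :=
  match runs.getLast? with
  | some cn => if cn.1 = ch then runs.dropLast ++ [(cn.1, cn.2 + 1)] else runs ++ [(ch, 1)]
  | none => runs ++ [(ch, 1)]

-- Source B stage 2 loop body: state (result, pos); a '+'-run of length k emits the k-1 flips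
-- at offsets pos..pos+k-2 (inner 'for j in range(k-1)' appends; rendered as a map), then pos += k
def emitRun (s : String) (st : List String × Int) (ck : Char × Int) : List String × Int :=
  (if ck.1 = '+' then
     st.1 ++ (PySem.List.pyRange 0 (ck.2 - 1) 1).map (fun j =>
       String.ofList (PySem.Chars.slice s.toList none (some (st.2 + j)) ++
         '-' :: '-' :: PySem.Chars.slice s.toList (some (st.2 + j + 2)) none))
   else st.1, st.2 + ck.2)

def return_first_move_flip_game_alt (s : String) : List String :=
  ((s.toList.foldl rleStep []).foldl (emitRun s) ([], 0)).1

-- ===== PRECONDITION & SPEC =====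
def Spec_return_first_move_flip_game (s : String) (out : List String) : Prop := out = return_first_move_flip_game_alt s
instance (s : String) (out : List String) : Decidable (Spec_return_first_move_flip_game s out) := by unfold Spec_return_first_move_flip_game; infer_instance

-- ===== CLAIM (what is proved, stated in full; the proofs are below) =====
def Claim_equal_return_first_move_flip_game : Prop := ∀ (s : String), Dom_return_first_move_flip_game s → Spec_return_first_move_flip_game s (return_first_move_flip_game s)

-- ===== LEMMAS AND PROOFS =====

-- a '++' at position j, as a Bool
def matchB (l : List Char) (j : Nat) : Bool := l[j]? == some '+' && l[j + 1]? == some '+'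

-- the common specification: flip results at all match positions ≥ k, in increasing order
def flipSpec (l : List Char) (k : Nat) : List String :=
  ((List.range l.length).filter (fun j => decide (k ≤ j) && matchB l j)).map
    (fun j => String.ofList (l.take j ++ '-' :: '-' :: l.drop (j + 2)))

-- A's per-step condition and emitted string
def condBool (s : String) (p : Int × Char) : Bool :=
  decide (p.1 ≠ PySem.Str.len s - 1) &&
    (decide (p.2 = '+') && decide (PySem.Str.pyGet? s (p.1 + 1) = some '+'))

def emitA (s : String) (p : Int × Char) : String :=
  String.ofList ((s.toList.set p.1.toNat '-').set (p.1.toNat + 1) '-')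

lemma matchB_iff (l : List Char) (j : Nat) :
    matchB l j = true ↔ l[j]? = some '+' ∧ l[j + 1]? = some '+' := by
  simp [matchB]

lemma matchB_lt (l : List Char) (j : Nat) (h : matchB l j = true) : j + 2 ≤ l.length := by
  rw [matchB_iff] at h
  obtain ⟨hlt, -⟩ := List.getElem?_eq_some_iff.mp h.2
  omega

lemma flipSpec_nil (l : List Char) (k : Nat)
    (h : ∀ j, k ≤ j → matchB l j = false) : flipSpec l k = [] := by
  unfold flipSpec
  rw [List.filter_eq_nil_iff.mpr, List.map_nil]
  intro j _
  by_cases hj : k ≤ j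
  · simp [hj, h j hj]
  · simp [hj]

-- restoring the two flipped cells gives back the original array
lemma set_restore (l : List Char) (j : Nat) (h0 : l[j]? = some '+') (h1 : l[j + 1]? = some '+') :
    ((((l.set j '-').set (j + 1) '-').set j '+').set (j + 1) '+') = l := by
  obtain ⟨hj1, hv1⟩ := List.getElem?_eq_some_iff.mp h0
  obtain ⟨hj2, hv2⟩ := List.getElem?_eq_some_iff.mp h1
  apply List.ext_getElem?
  intro m
  simp only [List.getElem?_set, List.length_set]
  by_cases e1 : j + 1 = m
  · subst e1
    simp [hj2, hv2]
  · by_cases e2 : j = m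
    · subst e2
      simp [hj1, hv1]
    · simp [e1, e2]

-- the two '-'-writes are a take/drop splice
lemma set_set_eq (l : List Char) (j : Nat) (h : j + 1 < l.length) :
    (l.set j '-').set (j + 1) '-' = l.take j ++ '-' :: '-' :: l.drop (j + 2) := by
  induction j generalizing l with
  | zero =>
    match l with
    | [] => simp at h
    | [a] => simp at h
    | a :: b :: t => simp
  | succ j ih =>
    match l with
    | [] => simp at h
    | a :: t =>
      simp only [List.set_cons_succ, List.take_succ_cons, List.drop_succ_cons, List.cons_append]
      congr 1
      exact ih t (by simpa using h)

-- the A-side fold: array restored each step, results accumulated for matching pairs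
lemma foldA (s : String) (ps : List (Int × Char)) (acc : List String)
    (hps : ∀ p ∈ ps, ∃ j : Nat, p.1 = (j : Int) ∧ s.toList[j]? = some p.2) :
    ps.foldl (aStep s) (s.toList, acc) = (s.toList, acc ++ (ps.filter (condBool s)).map (emitA s)) := by
  induction ps generalizing acc with
  | nil => simp
  | cons p ps ih =>
    obtain ⟨j, hj, hval⟩ := hps p (List.mem_cons_self)
    have hps' : ∀ q ∈ ps, ∃ j : Nat, q.1 = (j : Int) ∧ s.toList[j]? = some q.2 :=
      fun q hq => hps q (List.mem_cons_of_mem _ hq)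
    rw [List.foldl_cons]
    by_cases hout : p.1 ≠ PySem.Str.len s - 1
    · by_cases hin : p.2 = '+' ∧ PySem.Str.pyGet? s (p.1 + 1) = some '+'
      · have h0 : s.toList[j]? = some '+' := by rw [hval, hin.1]
        have h1 : s.toList[j + 1]? = some '+' := by
          have := hin.2
          rw [hj, show ((j : Int) + 1) = ((j + 1 : Nat) : Int) by push_cast; ring] at this
          simp only [PySem.Str.pyGet?_eq, PySem.Chars.pyGet?_eq_listPyGet?,
            PySem.List.pyGet?_natCast] at this
          exact this
        have hstep : aStep s (s.toList, acc) p = (s.toList, acc ++ [emitA s p]) := by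
          unfold aStep
          rw [if_pos hout, if_pos hin]
          simp only [hj, Int.toNat_natCast]
          rw [set_restore s.toList j h0 h1]
          simp [emitA, hj]
        rw [hstep, ih _ hps', List.filter_cons, List.append_assoc]
        have : condBool s p = true := by
          simp only [condBool, Bool.and_eq_true, decide_eq_true_eq]
          exact ⟨hout, hin.1, hin.2⟩
        simp [this]
      · have hstep : aStep s (s.toList, acc) p = (s.toList, acc) := by
          unfold aStep; rw [if_pos hout, if_neg hin]
        rw [hstep, ih _ hps', List.filter_cons]
        have : condBool s p = false := by
          rcases not_and_or.mp hin with hc | hc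
          · simp only [condBool, decide_eq_false hc, Bool.false_and, Bool.and_false]
          · simp only [condBool, decide_eq_false hc, Bool.and_false]
        simp [this]
    · have hstep : aStep s (s.toList, acc) p = (s.toList, acc) := by
        unfold aStep; rw [if_neg hout]
      rw [hstep, ih _ hps', List.filter_cons]
      have : condBool s p = false := by
        simp only [condBool, decide_eq_false hout, Bool.false_and]
      simp [this]

lemma pyRangeCast (n : Nat) : PySem.List.pyRange 0 (n : Int) 1 = (List.range n).map Nat.cast := by
  rw [PySem.List.pyRange_one, List.map_eq_flatMap]
  simp
  exact (List.map_eq_flatMap).symm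

-- A computes flipSpec 0
lemma portA_eq (s : String) : return_first_move_flip_game s = flipSpec s.toList 0 := by
  have hps : ∀ p ∈ PySem.List.enumerate s.toList, ∃ j : Nat, p.1 = (j : Int) ∧ s.toList[j]? = some p.2 := by
    intro p hp
    obtain ⟨k, hk, rfl⟩ := (PySem.List.mem_enumerate_iff s.toList 0 p).mp hp
    exact ⟨k, by simp, by simp [List.getElem?_eq_getElem hk]⟩
  have hcongr : ∀ j ∈ List.range s.toList.length,
      condBool s ((j : Int), PySem.List.pyGetD s.toList (j : Int) ' ') = (decide (0 ≤ j) && matchB s.toList j) := by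
    intro j hj
    have hjn : j < s.toList.length := List.mem_range.mp hj
    have hA : PySem.Str.pyGet? s ((j : Int) + 1) = s.toList[j + 1]? := by
      simp only [PySem.Str.pyGet?_eq, PySem.Chars.pyGet?_eq_listPyGet?]
      rw [show ((j : Int) + 1) = ((j + 1 : Nat) : Int) by push_cast; ring]
      simp only [PySem.List.pyGet?_natCast]
    have hB : PySem.List.pyGetD s.toList (j : Int) ' ' = s.toList.getD j ' ' :=
      PySem.List.pyGetD_natCast s.toList j ' '
    have hC : PySem.Str.len s = (s.toList.length : Int) := by simp
    apply Bool.coe_iff_coe.mp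
    simp only [condBool, matchB, hA, hB, hC, Bool.and_eq_true, decide_eq_true_eq, beq_iff_eq,
      Nat.zero_le, decide_true, Bool.true_and]
    constructor
    · rintro ⟨hne, hgd, hget⟩
      refine ⟨?_, hget⟩
      rw [List.getD_eq_getElem?_getD, List.getElem?_eq_getElem hjn] at hgd
      rw [List.getElem?_eq_getElem hjn]
      simpa using hgd
    · rintro ⟨hget0, hget1⟩
      obtain ⟨hlt1, -⟩ := List.getElem?_eq_some_iff.mp hget1
      refine ⟨by omega, ?_, hget1⟩
      rw [List.getD_eq_getElem?_getD, hget0]; rfl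
  unfold return_first_move_flip_game
  rw [foldA s _ [] hps]
  simp only [List.nil_append]
  rw [PySem.List.enumerate_eq_map_pyRange s.toList ' ']
  have hlen : PySem.List.len s.toList = (s.toList.length : Int) := by simp [PySem.List.len]
  rw [hlen, pyRangeCast, List.map_map, List.filter_map, List.map_map]
  simp only [Function.comp_def]
  unfold flipSpec
  rw [List.filter_congr hcongr]
  apply List.map_congr_left
  intro j hj
  rw [List.mem_filter] at hj
  obtain ⟨hjr, hcond⟩ := hj
  have hm : matchB s.toList j = true := by
    rw [Bool.and_eq_true] at hcond; exact hcond.2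
  have hlt : j + 1 < s.toList.length := by
    have := matchB_lt s.toList j hm
    omega
  simp only [emitA, Int.toNat_natCast]
  rw [set_set_eq s.toList j hlt]

-- ======== B side ========

-- the string a run list denotes
def decode (rs : List (Char × Int)) : List Char :=
  (rs.map (fun ck => List.replicate ck.2.toNat ck.1)).flatten

-- invariant of stage 1: all counts ≥ 1 and adjacent runs carry distinct chars
def GoodRuns (rs : List (Char × Int)) : Prop :=
  (∀ ck ∈ rs, 1 ≤ ck.2) ∧ List.IsChain Ne (rs.map Prod.fst)

lemma decode_append (xs ys : List (Char × Int)) :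
    decode (xs ++ ys) = decode xs ++ decode ys := by
  simp [decode]

lemma rleStep_spec (rs : List (Char × Int)) (ch : Char) (h : GoodRuns rs) :
    GoodRuns (rleStep rs ch) ∧ decode (rleStep rs ch) = decode rs ++ [ch] := by
  obtain ⟨hcnt, hch⟩ := h
  unfold rleStep
  match hlast : rs.getLast? with
  | none =>
    have : rs = [] := List.getLast?_eq_none_iff.mp hlast
    subst this
    dsimp only
    refine ⟨⟨?_, ?_⟩, ?_⟩
    · intro ck hck; simp at hck; simp [hck]
    · exact List.isChain_singleton _
    · simp [decode]
  | some cn =>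
    obtain ⟨l', hl'⟩ := List.getLast?_eq_some_iff.mp hlast
    have hdl : rs.dropLast = l' := by rw [hl']; simp
    dsimp only
    by_cases hc : cn.1 = ch
    · rw [if_pos hc]
      have hn1 : 1 ≤ cn.2 := hcnt cn (by rw [hl']; simp)
      refine ⟨⟨?_, ?_⟩, ?_⟩
      · intro ck hck
        rcases List.mem_append.mp hck with hm | hm
        · have hm' : ck ∈ l' := by rwa [hdl] at hm
          exact hcnt ck (by rw [hl']; exact List.mem_append_left _ hm')
        · simp at hm; subst hm; omega
      · have : (rs.dropLast ++ [(cn.1, cn.2 + 1)]).map Prod.fst = rs.map Prod.fst := by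
          rw [hdl]
          conv_rhs => rw [hl']
          simp
        rw [this]; exact hch
      · rw [decode_append, hdl]
        conv_rhs => rw [hl', decode_append]
        rw [List.append_assoc]
        congr 1
        have h2 : (cn.2 + 1).toNat = cn.2.toNat + 1 := by omega
        simp only [decode, List.map_cons, List.map_nil, List.flatten_cons, List.flatten_nil,
          List.append_nil, h2, hc]
        rw [List.replicate_succ']
    · rw [if_neg hc]
      refine ⟨⟨?_, ?_⟩, ?_⟩
      · intro ck hck
        rcases List.mem_append.mp hck with hm | hm
        · exact hcnt ck hm
        · simp at hm; subst hm; simp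
      · rw [List.map_append, List.isChain_append]
        refine ⟨hch, by simp, ?_⟩
        intro x hx y hy
        rw [List.getLast?_map, hlast] at hx
        simp at hx hy
        subst hx; subst hy; exact hc
      · rw [decode_append]
        simp [decode]

lemma rle_foldl (l : List Char) : ∀ rs, GoodRuns rs →
    GoodRuns (l.foldl rleStep rs) ∧ decode (l.foldl rleStep rs) = decode rs ++ l := by
  induction l with
  | nil => intro rs h; simpa using h
  | cons c t ih =>
    intro rs h
    obtain ⟨h1, h2⟩ := rleStep_spec rs c h
    obtain ⟨g1, g2⟩ := ih (rleStep rs c) h1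
    exact ⟨g1, by rw [List.foldl_cons, g2, h2, List.append_assoc]; rfl⟩

lemma head?_decode (rs : List (Char × Int)) (h : ∀ ck ∈ rs, 1 ≤ ck.2) :
    (decode rs).head? = (rs.map Prod.fst).head? := by
  match rs with
  | [] => rfl
  | ck :: t =>
    have h1 : 1 ≤ ck.2 := h ck List.mem_cons_self
    obtain ⟨m, hm⟩ : ∃ m, ck.2.toNat = m + 1 := ⟨ck.2.toNat - 1, by omega⟩
    simp only [decode, List.map_cons, List.flatten_cons, hm, List.replicate_succ,
      List.cons_append, List.head?_cons]

-- split of the ordered position filter at a cut point m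
lemma filter_range_interval (n p m : Nat) (P : Nat → Bool) (hpm : p ≤ m) (hmn : m ≤ n) :
    (List.range n).filter (fun j => decide (p ≤ j) && P j)
      = (List.range' p (m - p)).filter P
        ++ (List.range n).filter (fun j => decide (m ≤ j) && P j) := by
  obtain ⟨d, rfl⟩ : ∃ d, m = p + d := ⟨m - p, by omega⟩
  obtain ⟨e, rfl⟩ : ∃ e, n = p + d + e := ⟨n - (p + d), by omega⟩
  rw [show p + d - p = d by omega]
  have hr : List.range (p + d + e) = (List.range' 0 p ++ List.range' p d) ++ List.range' (p + d) e := by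
    have h1 := @List.range'_append 0 p d 1
    have h2 := @List.range'_append 0 (p + d) e 1
    simp only [one_mul, zero_add] at h1 h2
    rw [List.range_eq_range', h1, h2]
  have e0 : (List.range' 0 p).filter (fun j => decide (p ≤ j) && P j) = [] := by
    apply List.filter_eq_nil_iff.mpr
    intro j hj
    have : j < p := by have := List.mem_range'_1.mp hj; omega
    simp; omega
  have e0' : (List.range' 0 p).filter (fun j => decide (p + d ≤ j) && P j) = [] := by
    apply List.filter_eq_nil_iff.mpr
    intro j hj
    have : j < p := by have := List.mem_range'_1.mp hj; omega
    simp; omega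
  have e1 : (List.range' p d).filter (fun j => decide (p ≤ j) && P j)
      = (List.range' p d).filter P := by
    apply List.filter_congr
    intro j hj
    have : p ≤ j := (List.mem_range'_1.mp hj).1
    simp [this]
  have e1' : (List.range' p d).filter (fun j => decide (p + d ≤ j) && P j) = [] := by
    apply List.filter_eq_nil_iff.mpr
    intro j hj
    have := List.mem_range'_1.mp hj
    simp; omega
  have e2 : (List.range' (p + d) e).filter (fun j => decide (p ≤ j) && P j)
      = (List.range' (p + d) e).filter (fun j => decide (p + d ≤ j) && P j) := by
    apply List.filter_congr
    intro j hj
    have hge : p + d ≤ j := (List.mem_range'_1.mp hj).1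
    have : p ≤ j := by omega
    simp [hge, this]
  rw [hr]
  simp only [List.filter_append, e0, e0', e1, e1', e2, List.nil_append, List.append_nil]

-- stage 2 of B consumes the runs of the tail and appends exactly flipSpec from that offset
lemma foldEmit (s : String) : ∀ (rs : List (Char × Int)) (acc : List String) (p : Nat),
    GoodRuns rs → decode rs = s.toList.drop p → p ≤ s.toList.length →
    (rs.foldl (emitRun s) (acc, (p : Int))).1 = acc ++ flipSpec s.toList p := by
  intro rs
  induction rs with
  | nil =>
    intro acc p _ hd hp
    have hlen : s.toList.length ≤ p := by
      have hnil : s.toList.drop p = [] := by rw [← hd]; rfl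
      have := List.drop_eq_nil_iff.mp hnil
      omega
    rw [List.foldl_nil, flipSpec_nil]
    · simp
    · intro j hj
      have : s.toList[j]? = none := List.getElem?_eq_none (by omega)
      simp [matchB, this]
  | cons ck t ih =>
    intro acc p hg hd hp
    obtain ⟨c, k⟩ := ck
    set l := s.toList with hl
    obtain ⟨hcnt, hch⟩ := hg
    have hk1 : 1 ≤ k := hcnt (c, k) List.mem_cons_self
    set K := k.toNat with hK
    have hK1 : 1 ≤ K := by omega
    have hdec : List.replicate K c ++ decode t = l.drop p := by
      simpa [decode, List.flatten_cons] using hd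
    have hlenK : p + K ≤ l.length := by
      have := congrArg List.length hdec
      simp [List.length_drop] at this
      omega
    have hgt : GoodRuns t := by
      refine ⟨fun x hx => hcnt x (List.mem_cons_of_mem _ hx), ?_⟩
      simpa using hch.tail
    have hdt : decode t = l.drop (p + K) := by
      have h := congrArg (List.drop K) hdec
      rw [List.drop_append_of_le_length (by simp), List.drop_replicate, Nat.sub_self,
        List.replicate_zero, List.nil_append] at h
      rw [h, List.drop_drop, Nat.add_comm]
    -- characters inside and just after the run
    have hin : ∀ i, i < K → l[p + i]? = some c := by
      intro i hi
      have : (l.drop p)[i]? = some c := by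
        rw [← hdec, List.getElem?_append_left (by simpa using hi)]
        simp [hi]
      rwa [List.getElem?_drop] at this
    have hafter : l[p + K]? = (decode t).head? := by
      have : (l.drop p)[K]? = (decode t)[0]? := by
        rw [← hdec, List.getElem?_append_right (by simp), List.length_replicate, Nat.sub_self]
      rw [List.getElem?_drop] at this
      rw [this, ← List.head?_eq_getElem?]
    have hafter_ne : (decode t).head? ≠ some c := by
      rw [head?_decode t hgt.1]
      intro hcon
      match ht : t with
      | [] => simp at hcon
      | x :: t2 =>
        simp at hcon
        have := (List.isChain_cons.mp hch).1 x.1 (by simp)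
        exact this hcon.symm
    -- matches inside the run
    have hmid : ∀ j, p ≤ j → j + 1 < p + K → matchB l j = (c == '+') := by
      intro j hj hj2
      have e0 : l[j]? = some c := by
        have := hin (j - p) (by omega); rwa [show p + (j - p) = j by omega] at this
      have e1 : l[j + 1]? = some c := by
        have := hin (j + 1 - p) (by omega); rwa [show p + (j + 1 - p) = j + 1 by omega] at this
      simp [matchB, e0, e1]
    have hend : matchB l (p + K - 1) = false := by
      have e0 : l[p + K - 1]? = some c := by
        have := hin (K - 1) (by omega); rwa [show p + (K - 1) = p + K - 1 by omega] at this
      have e1 : l[p + K - 1 + 1]? = (decode t).head? := by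
        rw [show p + K - 1 + 1 = p + K by omega]; exact hafter
      by_cases hc : c = '+'
      · subst hc
        cases hx : (decode t).head? with
        | none => simp [matchB, e0, e1, hx]
        | some d =>
          have : d ≠ '+' := by rw [hx] at hafter_ne; intro h; exact hafter_ne (by rw [h])
          simp [matchB, e0, e1, hx, this]
      · simp [matchB, e0, hc]
    -- split flipSpec at p + K
    have hsplit : flipSpec l p
        = (if c = '+' then (List.range' p (K - 1)).map
            (fun j => String.ofList (l.take j ++ '-' :: '-' :: l.drop (j + 2))) else [])
          ++ flipSpec l (p + K) := by
      unfold flipSpec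
      rw [filter_range_interval l.length p (p + K) (matchB l) (by omega) hlenK,
        List.map_append]
      congr 1
      have hr : List.range' p (p + K - p) = List.range' p (K - 1) ++ [p + K - 1] := by
        have h1 := @List.range'_append p (K - 1) 1 1
        simp only [one_mul, List.range'_one] at h1
        rw [show p + K - p = K - 1 + 1 by omega, ← h1, show p + (K - 1) = p + K - 1 by omega]
      rw [hr, List.filter_append]
      have hone : [p + K - 1].filter (matchB l) = [] := by simp [hend]
      rw [hone, List.append_nil]
      by_cases hc : c = '+'
      · rw [if_pos hc]
        have : (List.range' p (K - 1)).filter (matchB l) = List.range' p (K - 1) := by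
          apply List.filter_eq_self.mpr
          intro j hj
          have hj' := List.mem_range'_1.mp hj
          rw [hmid j hj'.1 (by omega), hc]
          simp
        rw [this]
      · rw [if_neg hc]
        have : (List.range' p (K - 1)).filter (matchB l) = [] := by
          apply List.filter_eq_nil_iff.mpr
          intro j hj
          have hj' := List.mem_range'_1.mp hj
          rw [hmid j hj'.1 (by omega)]
          simp [hc]
        rw [this, List.map_nil]
    -- step of the fold
    have hpair : emitRun s (acc, (p : Int)) (c, k)
        = ((emitRun s (acc, (p : Int)) (c, k)).1, ((p + K : Nat) : Int)) := by
      rw [Prod.ext_iff]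
      exact ⟨rfl, by simp only [emitRun]; push_cast; omega⟩
    rw [List.foldl_cons, hpair, ih _ (p + K) hgt hdt (by omega), hsplit]
    by_cases hc : c = '+'
    · simp only [emitRun, if_pos hc]
      rw [List.append_assoc]
      congr 2
      have hk' : k - 1 = ((K - 1 : Nat) : Int) := by omega
      rw [hk', pyRangeCast, List.map_map, List.range'_eq_map_range, List.map_map]
      apply List.map_congr_left
      intro j hj
      simp only [Function.comp_apply]
      have e1 : PySem.Chars.slice l none (some ((p : Int) + (j : Int))) = l.take (p + j) := by
        rw [PySem.Chars.slice_eq_listSlice]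
        have := PySem.List.slice_to l (show (0:Int) ≤ (p:Int) + (j:Int) by positivity)
        rw [this]
        congr 1
      have e2 : PySem.Chars.slice l (some ((p : Int) + (j : Int) + 2)) none = l.drop (p + j + 2) := by
        rw [PySem.Chars.slice_eq_listSlice,
          PySem.List.slice_from l (show (0:Int) ≤ (p:Int) + (j:Int) + 2 by positivity)]
        congr 1
      rw [e1, e2]
    · simp only [emitRun, if_neg hc]
      rw [List.nil_append]

-- B computes flipSpec 0
lemma portB_eq (s : String) : return_first_move_flip_game_alt s = flipSpec s.toList 0 := by
  unfold return_first_move_flip_game_alt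
  have hg0 : GoodRuns [] := ⟨by simp, by simp⟩
  obtain ⟨hg, hdec⟩ := rle_foldl s.toList [] hg0
  have hdec' : decode (s.toList.foldl rleStep []) = s.toList.drop 0 := by
    rw [hdec]; simp [decode]
  have := foldEmit s (s.toList.foldl rleStep []) [] 0 hg hdec' (by omega)
  simpa using this

-- ===== VERDICT (by name: the statement is the Claim_ definition above) =====
theorem return_first_move_flip_game_spec : Claim_equal_return_first_move_flip_game := by
  intro s _
  unfold Spec_return_first_move_flip_game
  rw [portA_eq, portB_eq]
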